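/- GENERATED by tools/mkcompositions.py from design/units.gif.tsv (unit `DGifSetupDecompress.COMPOSITION`) — do not edit.
   THE PROOF of the composition unit `DGifSetupDecompress.COMPOSITION`: the 5 segments of `DGifSetupDecompress` chain into its contract, by the theorem
   `Gif.Spec.DGifSetupDecompress.compose` (proved next to the cut assertions). -/
import Gif.Spec.Units.DGifSetupDecompress_COMPOSITION

/-- The segments of `DGifSetupDecompress` compose into its contract. -/
theorem Gif.Spec.Proved.DGifSetupDecompress_COMPOSITION_ok : Gif.Spec.DGifSetupDecompress_COMPOSITION.Statement := by
  intro Lay _hLay μ _hμ u₀ h_DGifSetupDecompress_P h_DGifSetupDecompress_1 h_DGifSetupDecompress_2 h_DGifSetupDecompress_3 h_DGifSetupDecompress_E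
  apply Gif.Spec.DGifSetupDecompress.compose
  all_goals assumption
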